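-- pv_equiv track=rewrite | github.com/hossainrafiu/ESC180 | Lectures/Oct18/Oct18.py | n_as_plus_b
-- ===== SOURCE A (Python) =====
-- def n_as_plus_b(s, n):
--     """Return True iff s contains a substring of exactly n "a"s followed by
--     exactly one b
--
--     >>> n_as_plus_b("zaaabc",3)
--     True
--     >>> n_as_plus_b("zaaaabc",3)
--     False
--     >>> n_as_plus_b("zaaabbc",3)
--     False
--     """
--
--     cur_run_a = 0
--     for i in range(len(s)):
--         if s[i] == "a":
--             cur_run_a += 1
--         elif s[i] == "b":
--             if cur_run_a == n:
--                 if i == len(s) - 1: #end of str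
--                     return True
--                 if s[i+1] != "b": #no extra 'b'
--                     return True
--             cur_run_a = 0
--         else:
--             cur_run_a = 0
--     return False
-- ===== SOURCE B (Python) =====
-- def n_as_plus_b(s, n):
--     for i in range(len(s)):
--         if s[i] == "b" and (i == len(s) - 1 or s[i + 1] != "b"):
--             j = i
--             while j > 0 and s[j - 1] == "a":
--                 j -= 1
--             if i - j == n:
--                 return True
--     return False
-- ===== Notes on version B (the rewrite author's own statement) =====
-- stated objective: alternative
-- what changed: A makes one forward pass maintaining a running counter of consecutive a's; B instead checks each 'b' that is not followed by another 'b' and counts the a-run immediately before it with a backward scan, with no carried state.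
import Mathlib
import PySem

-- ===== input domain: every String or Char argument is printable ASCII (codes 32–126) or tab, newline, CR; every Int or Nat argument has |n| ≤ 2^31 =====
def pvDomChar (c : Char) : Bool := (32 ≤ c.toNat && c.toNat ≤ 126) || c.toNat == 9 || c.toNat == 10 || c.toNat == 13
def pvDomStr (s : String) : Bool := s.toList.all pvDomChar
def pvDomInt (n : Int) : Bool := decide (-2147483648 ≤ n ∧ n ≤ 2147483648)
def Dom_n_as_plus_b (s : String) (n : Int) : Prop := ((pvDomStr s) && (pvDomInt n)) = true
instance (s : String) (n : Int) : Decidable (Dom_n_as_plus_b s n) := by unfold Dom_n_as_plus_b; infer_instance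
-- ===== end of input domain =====

-- B replaces A's stateful single pass (running a-counter) by a stateless per-'b' check with a
-- backward count of the preceding a-run; alternative decomposition, same results.

-- ===== PORT A =====
-- A's index loop over s, ported as structural recursion on the remaining characters;
-- `run` is cur_run_a, `rest.head?` is the s[i+1] lookahead (none ⇔ i == len(s)-1).
def nasLoopA : List Char → Int → Int → Bool
  | [], _, _ => false
  | c :: rest, n, run =>
    if c = 'a' then nasLoopA rest n (run + 1)
    else if c = 'b' then
      if run = n then
        if rest = [] then true
        else if rest.head? ≠ some 'b' then true
        else nasLoopA rest n 0
      else nasLoopA rest n 0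
    else nasLoopA rest n 0

def n_as_plus_b (s : String) (n : Int) : Bool := nasLoopA s.toList n 0

-- ===== PORT B =====
-- B's backward while loop counting the a's immediately before position i:
-- prevRev is the prefix s[0:i] reversed, so the count is the leading-'a' run of prevRev.
def nasRunBefore : List Char → Int
  | [] => 0
  | c :: t => if c = 'a' then 1 + nasRunBefore t else 0

-- B's forward loop over positions, carrying the reversed prefix.
def nasLoopB : List Char → List Char → Int → Bool
  | _, [], _ => false
  | prevRev, c :: rest, n =>
    if c = 'b' ∧ (rest = [] ∨ rest.head? ≠ some 'b') then
      if nasRunBefore prevRev = n then true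
      else nasLoopB (c :: prevRev) rest n
    else nasLoopB (c :: prevRev) rest n

def n_as_plus_b_alt (s : String) (n : Int) : Bool := nasLoopB [] s.toList n

-- ===== PRECONDITION & SPEC =====
def Spec_n_as_plus_b (s : String) (n : Int) (out : Bool) : Prop := out = n_as_plus_b_alt s n
instance (s : String) (n : Int) (out : Bool) : Decidable (Spec_n_as_plus_b s n out) := by unfold Spec_n_as_plus_b; infer_instance

-- ===== CLAIM (what is proved, stated in full; the proofs are below) =====
def Claim_equal_n_as_plus_b : Prop := ∀ (s : String) (n : Int), Dom_n_as_plus_b s n → Spec_n_as_plus_b s n (n_as_plus_b s n)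

-- ===== LEMMAS AND PROOFS =====

-- Invariant: A's running counter equals the leading-'a' run of B's reversed prefix.
theorem nasLoop_eq (rest : List Char) : ∀ (prevRev : List Char) (n : Int),
    nasLoopA rest n (nasRunBefore prevRev) = nasLoopB prevRev rest n := by
  induction rest with
  | nil => intro prevRev n; simp [nasLoopA, nasLoopB]
  | cons c rest ih =>
    intro prevRev n
    by_cases ha : c = 'a'
    · subst ha
      have h1 : nasRunBefore prevRev + 1 = nasRunBefore ('a' :: prevRev) := by
        simp [nasRunBefore]; ring
      simp only [nasLoopA, nasLoopB, h1]
      rw [ih]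
      simp
    · by_cases hb : c = 'b'
      · subst hb
        have h0 : nasRunBefore ('b' :: prevRev) = 0 := by simp [nasRunBefore]
        by_cases hr : nasRunBefore prevRev = n
        · by_cases he : rest = [] ∨ rest.head? ≠ some 'b'
          · simp [nasLoopA, nasLoopB, hr, he]
            rcases he with he | he <;> simp [he]
          · push Not at he
            simp [nasLoopA, nasLoopB, hr, he.1, he.2, ← ih, h0]
        · by_cases he : rest = [] ∨ rest.head? ≠ some 'b' <;>
            simp [nasLoopA, nasLoopB, hr, he, ← ih, h0]
      · have h0 : nasRunBefore (c :: prevRev) = 0 := by simp [nasRunBefore, ha]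
        simp [nasLoopA, nasLoopB, ha, hb, ← ih, h0]

-- ===== VERDICT (by name: the statement is the Claim_ definition above) =====
theorem n_as_plus_b_spec : Claim_equal_n_as_plus_b := by
  intro s n _
  unfold Spec_n_as_plus_b n_as_plus_b n_as_plus_b_alt
  have := nasLoop_eq s.toList [] n
  simpa [nasRunBefore] using this
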